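-- pv_equiv track=rewrite | github.com/iero1997/audit-engine-s3-and-lambdas-dev | utilities/utils.py | get_next_item_dol
-- ===== SOURCE A (Python) =====
-- def get_next_item_dol(source_dol):
--     """ given source dict of list, with ordered lists
--         return dict of list, where each item provides the
--         next items in the source list, given a current item.
--         resulting next_item_dol starts with None as first key, and
--         if the item has no subsequent items, i.e. last in list,
--         then an item in the set is None.
--         None is always placed as the first item, even if it was appended last.
--     """
--
--     next_val_dol = {}
--
--     for key in source_dol:
--         prior_val = None
--         for val in source_dol[key] + [None]:
--             if prior_val in next_val_dol:
--                 if not val in next_val_dol[prior_val]: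
--                     next_val_dol[prior_val].append(val)
--             else:
--                 next_val_dol[prior_val] = [val]
--             prior_val = val
--
--     return next_val_dol
-- ===== SOURCE B (Python) =====
-- def get_next_item_dol(source_dol):
--     # Materialize the whole (prior, val) adjacency stream, then group by prior:
--     # keys in first-occurrence order, each row an ordered-unique filter of the stream.
--     pairs = []
--     for key in source_dol:
--         vals = list(source_dol[key]) + [None]
--         pairs.extend(zip([None] + vals, vals))
--     keys = dict.fromkeys(p for p, _ in pairs)
--     return {k: list(dict.fromkeys(v for p, v in pairs if p == k)) for k in keys}
-- ===== Notes on version B (the rewrite author's own statement) =====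
-- stated objective: alternative
-- what changed: A streams pairs once, growing a dict of lists with inline membership-test dedup; B has no dict accumulator at all: it materializes the flat (prior, val) adjacency stream, derives the key order as the ordered-unique priors, and builds each output row by filtering the whole stream for that key and ordered-deduping it.
import Mathlib
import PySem

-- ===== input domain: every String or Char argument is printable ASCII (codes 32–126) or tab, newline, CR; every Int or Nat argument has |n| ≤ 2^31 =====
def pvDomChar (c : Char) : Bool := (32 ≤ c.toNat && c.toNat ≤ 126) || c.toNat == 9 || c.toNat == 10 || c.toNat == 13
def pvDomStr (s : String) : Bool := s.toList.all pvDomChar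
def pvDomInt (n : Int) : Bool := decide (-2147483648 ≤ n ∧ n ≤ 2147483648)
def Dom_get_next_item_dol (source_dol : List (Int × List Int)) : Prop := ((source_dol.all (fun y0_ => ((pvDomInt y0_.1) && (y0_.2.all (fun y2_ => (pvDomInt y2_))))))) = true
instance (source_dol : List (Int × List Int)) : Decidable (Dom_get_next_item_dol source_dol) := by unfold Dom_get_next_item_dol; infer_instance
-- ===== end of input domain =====

-- B drops A's incrementally-grown dict accumulator: it materializes the flat (prior, val)
-- adjacency stream and group-bys it per key by filtering + ordered dedup (alternative decomposition, not faster).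

def NIDict := PySem.Dict (Option Int) (List (Option Int))

-- ===== PORT A =====
-- body of A's inner loop: prior_val is s.2, the dict is s.1; val becomes the new prior_val
def aStep (s : NIDict × Option Int) (val : Option Int) : NIDict × Option Int :=
  (if s.1.contains s.2 then
     (if val ∈ s.1.getD s.2 [] then s.1
      else s.1.modify s.2 [] (· ++ [val]))       -- next_val_dol[prior_val].append(val)
   else s.1.insert s.2 [val],                    -- next_val_dol[prior_val] = [val]
   val)

-- the Python dict argument, reconstructed from the association list (duplicate keys: last value wins, first position kept)
def get_next_item_dol (source_dol : List (Int × List Int)) : List (Option Int × List (Option Int)) :=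
  ((PySem.Dict.ofList source_dol).items.foldl
    (fun next_val_dol kv =>
      -- for val in source_dol[key] + [None], prior_val starting at None
      ((kv.2.map some ++ [none]).foldl aStep (next_val_dol, none)).1)
    PySem.Dict.empty).items

-- ===== PORT B =====
def get_next_item_dol_alt (source_dol : List (Int × List Int)) : List (Option Int × List (Option Int)) :=
  -- pairs.extend(zip([None] + vals, vals)) with vals = source_dol[key] + [None]
  let pairs : List (Option Int × Option Int) :=
    (PySem.Dict.ofList source_dol).items.foldl
      (fun pairs kv =>
        let vals : List (Option Int) := kv.2.map some ++ [none]
        pairs ++ (none :: vals).zip vals) []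
  let keys := PySem.List.dedup (pairs.map (·.1))                 -- dict.fromkeys(p for p,_ in pairs)
  keys.map (fun k =>
    (k, PySem.List.dedup ((pairs.filter (fun p => p.1 == k)).map (·.2))))

-- ===== PRECONDITION & SPEC =====
def Spec_get_next_item_dol (source_dol : List (Int × List Int)) (out : List (Option Int × List (Option Int))) : Prop := out = get_next_item_dol_alt source_dol
instance (source_dol : List (Int × List Int)) (out : List (Option Int × List (Option Int))) : Decidable (Spec_get_next_item_dol source_dol out) := by unfold Spec_get_next_item_dol; infer_instance

-- ===== CLAIM (what is proved, stated in full; the proofs are below) =====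
def Claim_equal_get_next_item_dol : Prop := ∀ (source_dol : List (Int × List Int)), Dom_get_next_item_dol source_dol → Spec_get_next_item_dol source_dol (get_next_item_dol source_dol)

-- ===== LEMMAS AND PROOFS =====

-- per-key pair stream and the group-by specification of a pair stream
def pairsOf (kv : Int × List Int) : List (Option Int × Option Int) :=
  let vals : List (Option Int) := kv.2.map some ++ [none]
  (none :: vals).zip vals

def specOf (s : List (Option Int × Option Int)) : List (Option Int × List (Option Int)) :=
  (PySem.List.dedup (s.map (·.1))).map
    (fun k => (k, PySem.List.dedup ((s.filter (fun p => p.1 == k)).map (·.2))))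

-- A's per-pair step, the reshaped form of aStep acting on (prior, val) pairs
def pairStepA (d : NIDict) (pv : Option Int × Option Int) : NIDict :=
  if d.contains pv.1 then
    (if pv.2 ∈ d.getD pv.1 [] then d else d.modify pv.1 [] (· ++ [pv.2]))
  else d.insert pv.1 [pv.2]

-- A's threaded inner fold is the fold of pairStepA over the zipped consecutive pairs
theorem reshapeA (rest : List (Option Int)) :
    ∀ (d : NIDict) (p : Option Int),
      (rest.foldl aStep (d, p)).1 = ((p :: rest).zip rest).foldl pairStepA d := by
  induction rest with
  | nil => intro d p; rfl
  | cons q r ih =>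
      intro d p
      show (r.foldl aStep (aStep (d, p) q)).1 = _
      have h1 : aStep (d, p) q = (pairStepA d (p, q), q) := rfl
      rw [h1, ih]
      rfl

theorem dedup_append_single (l : List (Option Int)) (x : Option Int) :
    PySem.List.dedup (l ++ [x]) =
      if x ∈ l then PySem.List.dedup l else PySem.List.dedup l ++ [x] := by
  simp only [PySem.List.dedup_eq_ofList, PySem.Set.ofList_append, PySem.Set.update_cons,
    PySem.Set.update_nil]
  by_cases hx : x ∈ l
  · simp [PySem.Set.add, hx, PySem.Set.mem_ofList]
  · simp [PySem.Set.add, hx, PySem.Set.mem_ofList]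

-- the invariant: folding pairStepA from the empty dict realizes the group-by spec
theorem fold_pairStepA_spec (s : List (Option Int × Option Int)) :
    (s.foldl pairStepA PySem.Dict.empty).items = specOf s := by
  induction s using List.reverseRecOn with
  | nil => rfl
  | append_singleton s pv ih =>
      rw [List.foldl_append, List.foldl_cons, List.foldl_nil]
      set d := s.foldl pairStepA PySem.Dict.empty with hd
      have hkeys : d.keys = PySem.List.dedup (s.map (·.1)) := by
        show d.items.map (·.1) = _
        rw [ih]; unfold specOf; rw [List.map_map]
        have hid : ((fun x : Option Int × List (Option Int) => x.1) ∘
            fun k => (k, PySem.List.dedup ((s.filter (fun p => p.1 == k)).map (·.2)))) = id := rfl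
        rw [hid, List.map_id]
      have hnd : d.keys.Nodup := by rw [hkeys]; exact PySem.List.nodup_dedup _
      have hfilt : ∀ k, (s ++ [pv]).filter (fun p => p.1 == k) =
          s.filter (fun p => p.1 == k) ++ if pv.1 = k then [pv] else [] := by
        intro k
        rw [List.filter_append]
        by_cases h : pv.1 = k <;> simp [h]
      by_cases hmem : pv.1 ∈ s.map (·.1)
      · -- existing key
        have hck : pv.1 ∈ d.keys := by
          rw [hkeys, PySem.List.mem_dedup]; exact hmem
        have hc : d.contains pv.1 = true := by
          rw [PySem.Dict.contains_eq_decide_mem_keys]; exact decide_eq_true hck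
        have hitem : (pv.1, PySem.List.dedup ((s.filter (fun p => p.1 == pv.1)).map (·.2))) ∈ d.items := by
          rw [ih]; unfold specOf
          exact List.mem_map.mpr ⟨pv.1, (PySem.List.mem_dedup _ _).mpr hmem, rfl⟩
        have hget : d.getD pv.1 [] = PySem.List.dedup ((s.filter (fun p => p.1 == pv.1)).map (·.2)) :=
          PySem.Dict.getD_of_mem_items _ hitem hnd []
        have hkeyeq : PySem.List.dedup ((s ++ [pv]).map (·.1)) = PySem.List.dedup (s.map (·.1)) := by
          rw [List.map_append, List.map_cons, List.map_nil, dedup_append_single, if_pos hmem]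
        unfold pairStepA
        rw [hc, if_pos rfl, hget]
        by_cases hin : pv.2 ∈ PySem.List.dedup ((s.filter (fun p => p.1 == pv.1)).map (·.2))
        · rw [if_pos hin, ih]
          unfold specOf
          rw [hkeyeq]
          apply List.map_congr_left
          intro k hk
          by_cases hkp : pv.1 = k
          · subst hkp
            rw [hfilt, if_pos rfl, List.map_append, List.map_cons, List.map_nil,
              dedup_append_single, if_pos ((PySem.List.mem_dedup _ _).mp hin)]
          · rw [hfilt, if_neg hkp, List.append_nil]
        · rw [if_neg hin]
          have hmod : d.modify pv.1 [] (· ++ [pv.2]) =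
              d.insert pv.1 (d.getD pv.1 [] ++ [pv.2]) := rfl
          rw [hmod, hget, PySem.Dict.items_insert_of_contains _ _ hc, ih]
          unfold specOf
          rw [hkeyeq, List.map_map]
          apply List.map_congr_left
          intro k hk
          by_cases hkp : pv.1 = k
          · subst hkp
            simp only [Function.comp]
            rw [if_pos (by simp)]
            rw [hfilt, if_pos rfl, List.map_append, List.map_cons, List.map_nil,
              dedup_append_single,
              if_neg (fun h => hin ((PySem.List.mem_dedup _ _).mpr h))]
          · have hne : ¬ (k = pv.1) := fun h => hkp h.symm
            simp only [Function.comp]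
            rw [if_neg (by simp [hne])]
            rw [hfilt, if_neg hkp, List.append_nil]
      · -- fresh key
        have hck : pv.1 ∉ d.keys := by
          rw [hkeys, PySem.List.mem_dedup]; exact hmem
        have hc : d.contains pv.1 = false := by
          rw [PySem.Dict.contains_eq_decide_mem_keys]; exact decide_eq_false hck
        have hfiltnil : s.filter (fun p => p.1 == pv.1) = [] := by
          apply List.filter_eq_nil_iff.mpr
          intro p hp
          simp only [beq_iff_eq]
          intro h
          exact hmem (List.mem_map.mpr ⟨p, hp, h⟩)
        unfold pairStepA
        rw [hc, if_neg (by simp), PySem.Dict.items_insert_of_not_contains _ _ hc, ih]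
        unfold specOf
        rw [List.map_append, List.map_cons, List.map_nil, dedup_append_single, if_neg hmem,
          List.map_append]
        congr 1
        · apply List.map_congr_left
          intro k hk
          have hkp : pv.1 ≠ k := fun h => hmem (h ▸ (PySem.List.mem_dedup _ _).mp hk)
          rw [hfilt, if_neg hkp, List.append_nil]
        · rw [List.map_cons, List.map_nil, hfilt, if_pos rfl, hfiltnil]
          rfl

-- A's whole computation is the fold of pairStepA over the flattened pair stream
theorem a_flatten (items : List (Int × List Int)) :
    ∀ d : NIDict,
      (items.foldl (fun d kv => ((kv.2.map some ++ [none]).foldl aStep (d, none)).1) d) =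
      ((items.flatMap pairsOf).foldl pairStepA d) := by
  induction items with
  | nil => intro d; rfl
  | cons kv r ih =>
      intro d
      rw [List.foldl_cons, ih, reshapeA, List.flatMap_cons, List.foldl_append]
      rfl

-- ===== VERDICT (by name: the statement is the Claim_ definition above) =====
theorem get_next_item_dol_spec : Claim_equal_get_next_item_dol := by
  intro src _
  unfold Spec_get_next_item_dol
  have hb : get_next_item_dol_alt src
      = specOf ((PySem.Dict.ofList src).items.foldl (fun acc kv => acc ++ pairsOf kv) []) := rfl
  unfold get_next_item_dol
  rw [a_flatten, fold_pairStepA_spec, hb, PySem.List.foldl_append_eq_flatMap (g := pairsOf)]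
  rfl
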